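-- pv_equiv track=rewrite | github.com/pypi-data/pypi-mirror-359 | packages/AstecManager/astecmanager-1.0.9-py3-none-any.whl/AstecManager/libs/lineage_distance.py | daughters
-- ===== SOURCE A (Python) =====
-- def daughters(c,cell_lineage):
--     """
--
--     :param c:
--     :param cell_lineage:
--
--     """
--     if c in cell_lineage:
--         child = cell_lineage[c] #
--         if len(child) == 0:
--             return None
--         elif len(child) == 1:
--             return daughters(child[0],cell_lineage)
--         else:
--             return child
--     else:
--         return None
-- ===== SOURCE B (Python) =====
-- def daughters(c, cell_lineage):
--     # Single-child links precomputed once; then follow them iteratively to the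
--     # first cell that is absent or has 0 or >=2 children, and report from there.
--     nxt = {k: v[0] for k, v in cell_lineage.items() if len(v) == 1}
--     while c in nxt:
--         c = nxt[c]
--     child = cell_lineage.get(c)
--     if not child:
--         return None
--     return child
-- ===== Notes on version B (the rewrite author's own statement) =====
-- stated objective: simpler
-- what changed: Replaces the recursion with a precomputed single-child link map followed by an iterative chase loop and one final lookup; no recursion (so no recursion-depth limit on long chains). Pre_ excludes only association lists with duplicate keys (no Python dict produces them) and inputs whose single-child chain starting at c is cyclic, on which A raises RecursionError (B's chase loop does not return a branch either); cycles not reachable from c stay inside Pre_ and A = B is proved there.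
import Mathlib
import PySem

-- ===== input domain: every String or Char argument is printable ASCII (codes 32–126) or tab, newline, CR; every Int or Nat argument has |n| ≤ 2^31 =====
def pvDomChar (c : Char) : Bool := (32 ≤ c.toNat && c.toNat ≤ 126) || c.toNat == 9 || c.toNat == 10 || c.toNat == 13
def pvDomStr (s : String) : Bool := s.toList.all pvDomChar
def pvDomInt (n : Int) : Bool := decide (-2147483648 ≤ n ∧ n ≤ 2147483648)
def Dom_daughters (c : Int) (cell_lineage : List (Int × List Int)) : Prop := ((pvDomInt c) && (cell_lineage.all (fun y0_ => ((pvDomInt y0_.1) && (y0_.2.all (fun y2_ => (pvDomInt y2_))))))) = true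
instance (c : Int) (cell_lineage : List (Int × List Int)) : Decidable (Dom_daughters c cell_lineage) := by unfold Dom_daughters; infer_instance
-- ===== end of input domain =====

-- B replaces A's recursion by a precomputed single-child link map and an iterative chase (objective: simpler).

-- ===== PORT A =====
-- A's recursion, with a fuel counter that never runs out on Pre_ inputs (the
-- single-child chain from c is acyclic there, so it visits at most
-- cl.length + 1 cells); fuel exhaustion is marked by the outer `none`.
def daughtersF (cell_lineage : List (Int × List Int)) : Nat → Int → Option (Option (List Int))
  | 0, _ => none
  | fuel + 1, c =>
    match (PySem.Dict.mk cell_lineage).get? c with          -- `if c in cell_lineage: child = cell_lineage[c]` (one lookup)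
    | some child =>
      if child.length = 0 then some none
      else if child.length = 1 then daughtersF cell_lineage fuel (child.headD 0)   -- child[0], in range since len = 1
      else some (some child)
    | none => some none

def daughters (c : Int) (cell_lineage : List (Int × List Int)) : Option (List Int) :=
  (daughtersF cell_lineage (cell_lineage.length + 2) c).getD none

-- ===== PORT B =====
-- nxt = {k: v[0] for k, v in cell_lineage.items() if len(v) == 1}
def singleNext (cell_lineage : List (Int × List Int)) : PySem.Dict Int Int :=
  (cell_lineage.filter (fun p => p.2.length == 1)).foldl
    (fun d p => d.insert p.1 (p.2.headD 0)) PySem.Dict.empty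

-- while c in nxt: c = nxt[c]   (fuel for totality; enough on Pre_ inputs, where the chase from c is acyclic)
def chaseF (nxt : PySem.Dict Int Int) : Nat → Int → Int
  | 0, c => c
  | fuel + 1, c =>
    match nxt.get? c with
    | some d => chaseF nxt fuel d
    | none => c

-- child = cell_lineage.get(c); if not child: return None; return child
def branchOf (cell_lineage : List (Int × List Int)) (e : Int) : Option (List Int) :=
  match (PySem.Dict.mk cell_lineage).get? e with
  | none => none
  | some child => if child.length = 0 then none else some child

def daughters_alt (c : Int) (cell_lineage : List (Int × List Int)) : Option (List Int) :=
  branchOf cell_lineage (chaseF (singleNext cell_lineage) (cell_lineage.length + 2) c)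

-- ===== PRECONDITION & SPEC =====
-- `lastOK cl x`: the single-child chain stops at x, or after one more hop from x.
def lastOK (cl : List (Int × List Int)) (x : Int) : Bool :=
  match (PySem.Dict.mk cl).get? x with
  | none => true
  | some ch =>
    if ch.length = 1 then
      match (PySem.Dict.mk cl).get? (ch.headD 0) with
      | none => true
      | some ch2 => ch2.length ≠ 1
    else true

-- `chainCert cl (c :: ks)`: ks certifies, step by step, that the single-child
-- chain starting at c terminates (each listed cell links to the next by a
-- one-element child list, and the chain stops at or just after the last one).
def chainCert (cl : List (Int × List Int)) : List Int → Bool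
  | [] => true
  | [x] => lastOK cl x
  | x :: y :: rest =>
    (match (PySem.Dict.mk cl).get? x with
     | some ch => ch.length == 1 && ch.headD 0 == y
     | none => false) && chainCert cl (y :: rest)

-- Pre_ excludes association lists with duplicate keys (no Python dict produces
-- them) and inputs whose single-child chain starting at c is cyclic: there A
-- raises RecursionError (and B's while loop does not return). Termination of
-- the chain from c is stated as the existence of the finite chain itself
-- (a permutation of a sublist of the keys); cycles elsewhere are admitted.
def Pre_daughters (c : Int) (cell_lineage : List (Int × List Int)) : Prop :=
  (cell_lineage.map Prod.fst).Nodup ∧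
  ∃ ks ∈ (cell_lineage.map Prod.fst).sublists.flatMap List.permutations,
    chainCert cell_lineage (c :: ks) = true
instance (c : Int) (cell_lineage : List (Int × List Int)) : Decidable (Pre_daughters c cell_lineage) := by
  unfold Pre_daughters; infer_instance

def pvWitness_daughters : Int × (List (Int × List Int)) := (2, [(2, [3]), (3, [4, 5])])

def Spec_daughters (c : Int) (cell_lineage : List (Int × List Int)) (out : Option (List Int)) : Prop := out = daughters_alt c cell_lineage
instance (c : Int) (cell_lineage : List (Int × List Int)) (out : Option (List Int)) : Decidable (Spec_daughters c cell_lineage out) := by unfold Spec_daughters; infer_instance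

-- ===== CLAIM (what is proved, stated in full; the proofs are below) =====
def Claim_equal_daughters : Prop := ∀ (c : Int) (cell_lineage : List (Int × List Int)), Dom_daughters c cell_lineage → Pre_daughters c cell_lineage → Spec_daughters c cell_lineage (daughters c cell_lineage)

-- ===== LEMMAS AND PROOFS =====

-- lookup in the input dict, under unique keys, is membership
theorem getQ_iff_mem {cl : List (Int × List Int)} (hnd : (cl.map Prod.fst).Nodup)
    {c : Int} {ch : List Int} :
    (PySem.Dict.mk cl).get? c = some ch ↔ (c, ch) ∈ cl := by
  have h := PySem.Dict.get?_eq_some_iff_mem_items (d := PySem.Dict.mk cl) (k := c) (v := ch) ?_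
  · simpa [PySem.Dict.items] using h
  · simpa [PySem.Dict.keys, PySem.Dict.items, Function.comp] using hnd

theorem getQ_none_iff {cl : List (Int × List Int)} {c : Int} :
    (PySem.Dict.mk cl).get? c = none ↔ c ∉ cl.map Prod.fst := by
  have h := PySem.Dict.get?_eq_none_iff_not_mem_keys (d := PySem.Dict.mk cl) (k := c)
  simpa [PySem.Dict.keys, PySem.Dict.items, Function.comp] using h

theorem singleNext_items {cl : List (Int × List Int)} (hnd : (cl.map Prod.fst).Nodup) :
    (singleNext cl).items
      = (cl.filter (fun p => p.2.length == 1)).map (fun p => (p.1, p.2.headD 0)) := by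
  have hsub : ((cl.filter (fun p => p.2.length == 1)).map Prod.fst).Sublist (cl.map Prod.fst) :=
    List.filter_sublist.map Prod.fst
  have hnd' : ((cl.filter (fun p => p.2.length == 1)).map Prod.fst).Nodup := hsub.nodup hnd
  have h := PySem.Dict.items_foldl_insert_fresh
      (l := cl.filter (fun p => p.2.length == 1))
      (k := Prod.fst) (v := fun p => p.2.headD 0) (d := PySem.Dict.empty)
      (by intro a _; simp [PySem.Dict.contains_empty]) hnd'
  simpa [singleNext, PySem.Dict.items, PySem.Dict.empty] using h

theorem singleNext_keys_nodup {cl : List (Int × List Int)} (hnd : (cl.map Prod.fst).Nodup) :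
    (singleNext cl).keys.Nodup := by
  have hsub : ((cl.filter (fun p => p.2.length == 1)).map Prod.fst).Sublist (cl.map Prod.fst) :=
    List.filter_sublist.map Prod.fst
  have : (singleNext cl).keys
      = ((cl.filter (fun p => p.2.length == 1)).map (fun p => (p.1, p.2.headD 0))).map Prod.fst := by
    simp [PySem.Dict.keys, singleNext_items hnd]
  rw [this, List.map_map]
  simpa [Function.comp] using hsub.nodup hnd

theorem singleNext_get_single {cl : List (Int × List Int)} (hnd : (cl.map Prod.fst).Nodup)
    {c : Int} {ch : List Int} (hm : (c, ch) ∈ cl) (h1 : ch.length = 1) :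
    (singleNext cl).get? c = some (ch.headD 0) := by
  have hmem : (c, ch.headD 0) ∈ (singleNext cl).items := by
    rw [singleNext_items hnd]
    exact List.mem_map.2 ⟨(c, ch), List.mem_filter.2 ⟨hm, by simpa using h1⟩, rfl⟩
  exact PySem.Dict.get?_of_mem_items _ hmem (singleNext_keys_nodup hnd)

theorem singleNext_get_none {cl : List (Int × List Int)} (hnd : (cl.map Prod.fst).Nodup)
    {c : Int} (h : ∀ ch : List Int, (c, ch) ∈ cl → ch.length ≠ 1) :
    (singleNext cl).get? c = none := by
  rw [PySem.Dict.get?_eq_none_iff_not_mem_keys]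
  intro hc
  rw [PySem.Dict.keys, singleNext_items hnd, List.map_map] at hc
  obtain ⟨p, hp, hpc⟩ := List.mem_map.1 hc
  obtain ⟨hpm, hp1⟩ := List.mem_filter.1 hp
  exact h p.2 (by rwa [show ((c : Int), p.2) = p by ext <;> simp [← hpc, Function.comp]]) (by simpa using hp1)

-- uniqueness of the entry for a key under Nodup
theorem entry_unique {cl : List (Int × List Int)} (hnd : (cl.map Prod.fst).Nodup)
    {c : Int} {ch ch' : List Int} (h : (c, ch) ∈ cl) (h' : (c, ch') ∈ cl) : ch = ch' := by
  have a := (getQ_iff_mem hnd).2 h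
  have b := (getQ_iff_mem hnd).2 h'
  rw [a] at b; exact Option.some.inj b

-- FUEL SUFFICIENCY: a chain certificate of length k lets A's recursion finish
-- within k + 2 steps of fuel
theorem cert_isSome {cl : List (Int × List Int)} :
    ∀ (ks : List Int) (c : Int) (fuel : Nat), chainCert cl (c :: ks) = true →
      ks.length + 2 ≤ fuel → (daughtersF cl fuel c).isSome := by
  intro ks
  induction ks with
  | nil =>
    intro c fuel hc hf
    obtain ⟨f, rfl⟩ : ∃ f, fuel = f + 1 := ⟨fuel - 1, by omega⟩
    rw [daughtersF]
    cases hget : (PySem.Dict.mk cl).get? c with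
    | none => simp
    | some ch =>
      by_cases h0 : ch.length = 0
      · simp [h0]
      by_cases h1 : ch.length = 1
      · simp only [h1, if_true]
        obtain ⟨f', rfl⟩ : ∃ f', f = f' + 1 := ⟨f - 1, by omega⟩
        rw [daughtersF]
        simp only [chainCert, lastOK, hget, h1, if_true] at hc
        cases hget2 : (PySem.Dict.mk cl).get? (ch.headD 0) with
        | none => simp
        | some ch2 =>
          rw [hget2] at hc
          have h2 : ch2.length ≠ 1 := by simpa using hc
          simp [h2, apply_ite]
      · simp [h0, h1]
  | cons y rest ih =>
    intro c fuel hc hf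
    obtain ⟨f, rfl⟩ : ∃ f, fuel = f + 1 := ⟨fuel - 1, by omega⟩
    simp only [chainCert, Bool.and_eq_true] at hc
    obtain ⟨hstep, hrest⟩ := hc
    cases hget : (PySem.Dict.mk cl).get? c with
    | none => rw [hget] at hstep; simp at hstep
    | some ch =>
      rw [hget] at hstep
      have hstep' : ch.length = 1 ∧ ch.headD 0 = y := by
        simpa [Bool.and_eq_true, List.headD_eq_head?_getD] using hstep
      obtain ⟨h1, hy⟩ := hstep'
      rw [daughtersF, hget]
      have h0 : ch.length ≠ 0 := by omega
      simp only [h1, if_true, hy]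
      exact ih y f hrest (by simpa using Nat.succ_le_succ_iff.mp hf)

-- SAME-FUEL EQUIVALENCE: whenever A's recursion finishes within the fuel, its value is
-- B's chase-then-branch value with the same fuel
theorem daughtersF_eq_chase {cl : List (Int × List Int)} (hnd : (cl.map Prod.fst).Nodup) :
    ∀ (fuel : Nat) (c : Int), (daughtersF cl fuel c).isSome →
      daughtersF cl fuel c = some (branchOf cl (chaseF (singleNext cl) fuel c)) := by
  intro fuel
  induction fuel with
  | zero => intro c h; simp [daughtersF] at h
  | succ n ih =>
    intro c hs
    rw [daughtersF] at hs ⊢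
    rw [chaseF]
    cases hget : (PySem.Dict.mk cl).get? c with
    | none =>
      have hnk : c ∉ cl.map Prod.fst := getQ_none_iff.1 hget
      have hx : (singleNext cl).get? c = none :=
        singleNext_get_none hnd (fun ch hm _ => hnk (List.mem_map.2 ⟨_, hm, rfl⟩))
      simp [hget, hx, branchOf]
    | some child =>
      have hmem : (c, child) ∈ cl := (getQ_iff_mem hnd).1 hget
      by_cases h0 : child.length = 0
      · have hx : (singleNext cl).get? c = none :=
          singleNext_get_none hnd (fun ch hm => by rw [entry_unique hnd hm hmem]; omega)
        simp [hget, hx, h0, branchOf]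
      by_cases h1 : child.length = 1
      · have hx : (singleNext cl).get? c = some (child.headD 0) :=
          singleNext_get_single hnd hmem h1
        rw [hget] at hs
        simp only [h1, if_true, hx] at hs ⊢
        exact ih _ hs
      · have hx : (singleNext cl).get? c = none :=
          singleNext_get_none hnd (fun ch hm => by rw [entry_unique hnd hm hmem]; omega)
        simp [hget, hx, h0, h1, branchOf]

-- ===== VERDICT (by name: the statement is the Claim_ definition above) =====
theorem daughters_spec : Claim_equal_daughters := by
  intro c cl _ hpre
  obtain ⟨hnd, ks, hmem, hcert⟩ := hpre
  have hlen : ks.length ≤ cl.length := by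
    obtain ⟨s, hs, hp⟩ := List.mem_flatMap.1 hmem
    have h1 : ks.length = s.length := (List.mem_permutations.1 hp).length_eq
    have h2 : s.length ≤ (cl.map Prod.fst).length := (List.mem_sublists.1 hs).length_le
    simpa [h1] using h2.trans (by simp)
  have hs := cert_isSome ks c (cl.length + 2) hcert (by omega)
  have heq := daughtersF_eq_chase hnd (cl.length + 2) c hs
  unfold Spec_daughters daughters daughters_alt
  rw [heq]; rfl
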